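-- pv_equiv track=rewrite | github.com/Coslate/Machine_Learning | HW4/python/Q1/hw4.py | MatrixIdentityGen
-- ===== SOURCE A (Python) =====
-- def MatrixIdentityGen(dimension, lamb=1):#lamb will multiply with 1 on the diagonal elements
--     matrix_c = []
--
--     for i in range(dimension):
--         row = []
--         for j in range(dimension):
--             if(i==j):
--                 row.append(1*lamb)
--             else:
--                 row.append(0)
--
--         matrix_c.append(row)
--
--     return matrix_c
-- ===== SOURCE B (Python) =====
-- def MatrixIdentityGen(dimension, lamb=1):
--     # Flat-buffer construction: repeating the period-(n+1) pattern [lamb,0,...,0]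
--     # n times yields the identity matrix flattened, because lamb lands at flat
--     # indices k with k % (n+1) == 0, i.e. at cell (i, j) exactly when j == i.
--     flat = ([1 * lamb] + [0] * dimension) * dimension
--     return [flat[i * dimension:(i + 1) * dimension] for i in range(dimension)]
-- ===== Notes on version B (the rewrite author's own statement) =====
-- stated objective: alternative
-- what changed: B builds a single flat buffer by repeating the period-(n+1) pattern [lamb,0,...,0] n times (the flattened identity) and then slices it into n rows, instead of A's nested per-cell branch loop.
import Mathlib
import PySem

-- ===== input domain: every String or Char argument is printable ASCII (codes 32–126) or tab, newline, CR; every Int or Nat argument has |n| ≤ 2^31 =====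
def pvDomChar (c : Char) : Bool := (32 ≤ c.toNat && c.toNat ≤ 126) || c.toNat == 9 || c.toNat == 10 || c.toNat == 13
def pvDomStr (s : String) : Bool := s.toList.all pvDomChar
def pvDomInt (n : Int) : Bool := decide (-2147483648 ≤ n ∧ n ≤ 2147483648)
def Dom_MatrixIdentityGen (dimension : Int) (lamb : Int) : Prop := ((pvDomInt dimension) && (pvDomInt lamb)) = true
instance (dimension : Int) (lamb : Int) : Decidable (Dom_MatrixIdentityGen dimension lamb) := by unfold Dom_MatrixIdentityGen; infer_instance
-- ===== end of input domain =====

-- B builds one flat buffer by repeating the period-(n+1) pattern [lamb,0,...,0] n times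
-- (the flattened identity matrix) and slices it into rows, instead of A's nested
-- per-cell branch loop (alternative algorithm, same exact outputs).

-- ===== PORT A =====
def MatrixIdentityGen (dimension : Int) (lamb : Int) : List (List Int) :=
  (PySem.List.pyRange 0 dimension 1).foldl
    (fun matrix_c i =>
      matrix_c ++ [(PySem.List.pyRange 0 dimension 1).foldl
        (fun row j => row ++ [if i == j then 1 * lamb else 0]) []])
    []

-- ===== PORT B =====
def MatrixIdentityGen_alt (dimension : Int) (lamb : Int) : List (List Int) :=
  -- flat = ([1*lamb] + [0]*dimension) * dimension
  let flat := PySem.List.pyRepeat ([1 * lamb] ++ PySem.List.pyRepeat [(0 : Int)] dimension) dimension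
  -- [flat[i*dimension:(i+1)*dimension] for i in range(dimension)]
  (PySem.List.pyRange 0 dimension 1).map
    (fun i => PySem.List.slice flat (some (i * dimension)) (some ((i + 1) * dimension)))

-- ===== PRECONDITION & SPEC =====
def Spec_MatrixIdentityGen (dimension : Int) (lamb : Int) (out : List (List Int)) : Prop := out = MatrixIdentityGen_alt dimension lamb
instance (dimension : Int) (lamb : Int) (out : List (List Int)) : Decidable (Spec_MatrixIdentityGen dimension lamb out) := by unfold Spec_MatrixIdentityGen; infer_instance

-- ===== CLAIM (what is proved, stated in full; the proofs are below) =====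
def Claim_equal_MatrixIdentityGen : Prop := ∀ (dimension : Int) (lamb : Int), Dom_MatrixIdentityGen dimension lamb → Spec_MatrixIdentityGen dimension lamb (MatrixIdentityGen dimension lamb)

-- ===== LEMMAS AND PROOFS =====

-- Dropping k·n elements of the flat buffer leaves k stray zeros (the tail of the k-th
-- pattern block) followed by the remaining n−k full pattern blocks.
theorem pvDrop (n : Nat) (v : Int) :
    ∀ k, k ≤ n →
      (List.flatten (List.replicate n (v :: List.replicate n (0 : Int)))).drop (k * n)
        = List.replicate k (0 : Int)
            ++ List.flatten (List.replicate (n - k) (v :: List.replicate n (0 : Int))) := by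
  intro k
  induction k with
  | zero => intro _; simp
  | succ k ih =>
      intro hk
      have h1 : (k + 1) * n = k * n + n := by ring
      rw [h1, ← List.drop_drop, ih (by omega)]
      rw [show n - k = (n - (k + 1)) + 1 by omega, List.replicate_succ, List.flatten_cons]
      rw [List.drop_append, List.drop_replicate, List.drop_append]
      simp only [List.length_replicate, List.length_cons]
      rw [show n - k = (n - (k+1)) + 1 by omega]
      simp only [List.drop_succ_cons, List.drop_replicate]
      rw [show n - (n - (k+1)) = k + 1 by omega,
          show n - (k + 1) + 1 - (n + 1) = 0 by omega,
          show k - n = 0 by omega]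
      simp

-- Row k of B: slicing the flat buffer at offsets k·n .. k·n+n yields row k of the identity.
theorem pvRowSlice (n : Nat) (v : Int) (k : Nat) (hk : k < n) :
    ((List.flatten (List.replicate n (v :: List.replicate n (0 : Int)))).drop (k * n)).take n
      = (List.replicate n (0 : Int)).set k v := by
  rw [pvDrop n v k (Nat.le_of_lt hk)]
  rw [show n - k = (n - (k + 1)) + 1 by omega, List.replicate_succ, List.flatten_cons]
  rw [List.take_append, List.take_replicate, Nat.min_eq_right (by omega)]
  simp only [List.length_replicate, List.cons_append]
  rw [show n - k = (n - (k + 1)) + 1 by omega, List.take_succ_cons, List.take_append,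
      List.take_replicate, Nat.min_eq_left (by omega), List.length_replicate,
      show n - (k + 1) - n = 0 by omega, List.take_zero, List.append_nil]
  apply List.ext_getElem
  · simp; omega
  · intro i h1 h2
    rw [List.getElem_set]
    by_cases hik : k = i
    · subst hik
      rw [List.getElem_append_right (by simp)]
      simp
    · rw [if_neg hik]
      simp only [List.length_append, List.length_replicate, List.length_cons] at h1
      by_cases hlt : i < k
      · rw [List.getElem_append_left (by simpa using hlt)]
        simp [List.getElem_replicate]
      · rw [List.getElem_append_right (by simp; omega)]
        have hne : i - k ≠ 0 := by omega
        rcases Nat.exists_eq_succ_of_ne_zero hne with ⟨m, hm⟩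
        simp [hm]

-- Row k of A: the branch-per-cell inner loop yields a zero row with entry k set.
theorem pvRow (n : Nat) (v : Int) (i : Nat) :
    ((List.range n).map (fun j : Nat => (j : Int))).map
        (fun j => if (i : Int) == j then v else 0)
      = (List.replicate n (0 : Int)).set i v := by
  apply List.ext_getElem
  · simp
  · intro j h1 h2
    simp only [List.length_map, List.length_range] at h1
    simp only [List.getElem_map, List.getElem_range]
    rw [List.getElem_set]
    by_cases hij : i = j
    · subst hij; simp
    · rw [if_neg hij]
      have hb : (((i : Int) == (j : Int)) = false) := by
        simp only [beq_eq_false_iff_ne, ne_eq, Int.natCast_inj]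
        omega
      simp [hb]

-- ===== VERDICT (by name: the statement is the Claim_ definition above) =====
theorem MatrixIdentityGen_spec : Claim_equal_MatrixIdentityGen := by
  intro dimension lamb _
  unfold Spec_MatrixIdentityGen MatrixIdentityGen MatrixIdentityGen_alt
  rw [PySem.List.pyRange_zero, PySem.List.pyRepeat_singleton]
  set n := dimension.toNat with hn
  rw [PySem.List.foldl_append_singleton_eq_map, List.nil_append]
  simp only [List.map_map, Function.comp_def]
  apply List.ext_getElem
  · simp
  · intro k h1 h2
    simp only [List.length_map, List.length_range] at h1
    simp only [List.getElem_map, List.getElem_range]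
    have hd : dimension = (n : Int) := by
      rw [hn, Int.toNat_of_nonneg]
      by_contra h
      push Not at h
      have : n = 0 := by rw [hn]; omega
      omega
    rw [PySem.List.foldl_append_singleton_eq_map, List.nil_append, pvRow n (1 * lamb) k]
    unfold PySem.List.pyRepeat
    rw [hd, show ((k : Int) + 1) * (n : Int) = (k : Int) * (n : Int) + (n : Int) by ring,
        show (k : Int) * (n : Int) = ((k * n : Nat) : Int) by push_cast; ring,
        PySem.List.slice_natCast_add]
    exact (pvRowSlice n (1 * lamb) k h1).symm
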